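-- pv_equiv track=rewrite | github.com/cjmcgreal/exercise | src/tree_viewer/tree_viewer_logic.py | get_subtree_names
-- ===== SOURCE A (Python) =====
-- from typing import Dict, List, Any, Optional, Set
--
-- def get_subtree_names(
--     root_name: str,
--     children_map: Dict[str, List[str]],
--     visited: Optional[Set[str]] = None
-- ) -> Set[str]:
--     """
--     Get all node names in a subtree (including the root).
--
--     Args:
--         root_name: Root of the subtree
--         children_map: Mapping of parent -> children
--         visited: Set of visited nodes (for cycle detection)
--
--     Returns:
--         Set of all node names in the subtree
--     """
--     if visited is None:
--         visited = set()
--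
--     if root_name in visited:
--         return set()
--
--     visited.add(root_name)
--     names = {root_name}
--
--     for child in children_map.get(root_name, []):
--         names.update(get_subtree_names(child, children_map, visited))
--
--     return names
-- ===== SOURCE B (Python) =====
-- def get_subtree_names(root_name, children_map, visited=None):
--     if visited is None:
--         visited = set()
--     names = set()
--     stack = [root_name]
--     while stack:
--         node = stack.pop()
--         if node in visited:
--             continue
--         visited.add(node)
--         names.add(node)
--         stack.extend(reversed(children_map.get(node, [])))
--     return names
-- ===== Notes on version B (the rewrite author's own statement) =====
-- stated objective: alternative
-- what changed: Replaces A's recursion (one call per node, with a set-union of each child subtree's names) by a single iterative DFS loop over an explicit stack that accumulates names directly.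
import Mathlib
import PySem

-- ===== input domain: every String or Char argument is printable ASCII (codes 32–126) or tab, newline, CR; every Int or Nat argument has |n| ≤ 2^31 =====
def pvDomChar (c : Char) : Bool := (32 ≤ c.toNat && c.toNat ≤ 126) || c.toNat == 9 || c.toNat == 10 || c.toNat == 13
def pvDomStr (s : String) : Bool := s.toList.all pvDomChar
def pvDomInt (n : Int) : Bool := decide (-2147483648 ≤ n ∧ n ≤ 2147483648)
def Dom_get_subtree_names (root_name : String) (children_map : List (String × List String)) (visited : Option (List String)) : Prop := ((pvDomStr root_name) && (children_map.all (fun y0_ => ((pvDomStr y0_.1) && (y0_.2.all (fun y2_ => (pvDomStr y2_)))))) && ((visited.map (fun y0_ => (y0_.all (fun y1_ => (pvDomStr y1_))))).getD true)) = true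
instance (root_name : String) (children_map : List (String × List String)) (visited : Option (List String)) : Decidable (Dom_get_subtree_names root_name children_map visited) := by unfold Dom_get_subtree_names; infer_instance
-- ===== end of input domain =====

-- B rewrites A's recursive subtree walk as an iterative DFS with an explicit stack (alternative
-- decomposition, same cost class); the theorem is about the RETURN value — both versions also end
-- up marking the same nodes in the shared `visited` set, but that is not part of the claim.

-- ===== PORT A =====
-- children_map.get(node, [])
def pvChilds (cmap : List (String × List String)) (x : String) : List String :=
  PySem.Dict.getD ⟨cmap⟩ x []

-- A's recursion with the mutated `visited` set threaded through explicitly: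
-- `pvGoA cmap fuel r v` returns (names, visited-after).  The fuel only makes the recursion
-- structural; the fuel passed by `get_subtree_names` below never runs out (pvGoA_fuel).
def pvGoA (cmap : List (String × List String)) : Nat → String → List String → List String × List String
  | 0, _, v => ([], v)
  | f + 1, r, v =>
    if PySem.Set.contains v r then ([], v)           -- if root_name in visited: return set()
    else
      (pvChilds cmap r).foldl                        -- for child in children_map.get(root_name, []):
        (fun p c =>
          let q := pvGoA cmap f c p.2                --   names.update(get_subtree_names(child, …, visited))
          (PySem.Set.update p.1 q.1, q.2))
        (PySem.Set.ofList [r], PySem.Set.add v r)    -- visited.add(root_name); names = {root_name}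

def get_subtree_names (root_name : String) (children_map : List (String × List String)) (visited : Option (List String)) : List String :=
  (pvGoA children_map ((children_map.flatMap Prod.snd).length + 3) root_name (visited.getD [])).1

-- ===== PORT B =====
-- termination helpers for B's stack loop (cited by pvGoB's decreasing_by)
def pvU (cmap : List (String × List String)) : List String :=
  cmap.map Prod.fst ++ cmap.flatMap Prod.snd

def pvNu (cmap : List (String × List String)) (v : List String) : Nat :=
  ((pvU cmap).toFinset.filter (fun x => x ∉ v)).card

theorem pvSet_add_of_not_mem {x : String} {v : List String} (h : x ∉ v) :
    PySem.Set.add v x = v ++ [x] := by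
  simp [PySem.Set.add, PySem.Set.contains, h]

theorem pvChilds_nil {cmap : List (String × List String)} {x : String}
    (h : x ∉ cmap.map Prod.fst) : pvChilds cmap x = [] := by
  have : cmap.find? (fun p => p.1 == x) = none := by
    apply List.find?_eq_none.mpr
    intro p hp
    simp only [beq_iff_eq]
    exact fun he => h (List.mem_map.mpr ⟨p, hp, he⟩)
  simp [pvChilds, PySem.Dict.getD, PySem.Dict.get?, this]

theorem pvNu_add_lt {cmap : List (String × List String)} {v : List String} {x : String}
    (hx : x ∈ pvU cmap) (hv : x ∉ v) : pvNu cmap (v ++ [x]) < pvNu cmap v := by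
  apply Finset.card_lt_card
  constructor
  · intro y hy
    simp only [Finset.mem_filter] at hy ⊢
    refine ⟨hy.1, fun hmem => hy.2 (by simp [hmem])⟩
  · intro hsub
    have := hsub (Finset.mem_filter.mpr ⟨List.mem_toFinset.mpr hx, hv⟩)
    simp at this

theorem pvNu_add_eq {cmap : List (String × List String)} {v : List String} {x : String}
    (hx : x ∉ pvU cmap) : pvNu cmap (v ++ [x]) = pvNu cmap v := by
  unfold pvNu
  congr 1
  apply Finset.filter_congr
  intro y hy
  have : y ≠ x := fun he => hx (he ▸ List.mem_toFinset.mp hy)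
  simp [this]

-- B's loop: the head of `s` is the top of the stack (the END of the Python list, where .pop()
-- pops and where extend(reversed(children)) has put the FIRST child).  `pvGoB cmap s v ns`
-- returns (names, visited-after); no fuel — it terminates by the (unvisited pool, stack size) measure.
def pvGoB (cmap : List (String × List String)) : List String → List String → List String → List String × List String
  | [], v, ns => (ns, v)
  | x :: s, v, ns =>
    if h : PySem.Set.contains v x then               -- if node in visited: continue
      pvGoB cmap s v ns
    else                                             -- visited.add(node); names.add(node)
      pvGoB cmap (pvChilds cmap x ++ s)              -- stack.extend(reversed(children_map.get(node, [])))
        (PySem.Set.add v x) (PySem.Set.add ns x)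
termination_by s v ns => (pvNu cmap v, s.length)
decreasing_by
  · exact Prod.Lex.right _ (by simp)
  · have hv : x ∉ v := by simpa [PySem.Set.contains] using h
    by_cases hx : x ∈ pvU cmap
    · rw [pvSet_add_of_not_mem hv]
      exact Prod.Lex.left _ _ (pvNu_add_lt hx hv)
    · rw [pvSet_add_of_not_mem hv, pvNu_add_eq hx,
        pvChilds_nil (fun hk => hx (by simp only [pvU, List.mem_append]; exact Or.inl hk))]
      exact Prod.Lex.right _ (by simp)

def get_subtree_names_alt (root_name : String) (children_map : List (String × List String)) (visited : Option (List String)) : List String :=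
  (pvGoB children_map [root_name] (visited.getD []) PySem.Set.empty).1

-- ===== PRECONDITION & SPEC =====
def Spec_get_subtree_names (root_name : String) (children_map : List (String × List String)) (visited : Option (List String)) (out : List String) : Prop := out = get_subtree_names_alt root_name children_map visited
instance (root_name : String) (children_map : List (String × List String)) (visited : Option (List String)) (out : List String) : Decidable (Spec_get_subtree_names root_name children_map visited out) := by unfold Spec_get_subtree_names; infer_instance

-- ===== CLAIM (what is proved, stated in full; the proofs are below) =====
def Claim_equal_get_subtree_names : Prop := ∀ (root_name : String) (children_map : List (String × List String)) (visited : Option (List String)), Dom_get_subtree_names root_name children_map visited → Spec_get_subtree_names root_name children_map visited (get_subtree_names root_name children_map visited)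

-- ===== LEMMAS AND PROOFS =====

-- A's fold step, named for the proofs
def pvStepA (cmap : List (String × List String)) (f : Nat) (p : List String × List String) (c : String) : List String × List String :=
  let q := pvGoA cmap f c p.2
  (PySem.Set.update p.1 q.1, q.2)

theorem pvGoA_succ (cmap : List (String × List String)) (f : Nat) (r : String) (v : List String) :
    pvGoA cmap (f + 1) r v =
      if PySem.Set.contains v r then ([], v)
      else (pvChilds cmap r).foldl (pvStepA cmap f) (PySem.Set.ofList [r], PySem.Set.add v r) := by
  rfl

-- set.update by fresh, duplicate-free elements is plain append
theorem pvUpdate_fresh : ∀ (δ ns : List String), δ.Nodup → (∀ y ∈ δ, y ∉ ns) →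
    PySem.Set.update ns δ = ns ++ δ := by
  intro δ
  induction δ with
  | nil => intro ns _ _; simp [PySem.Set.update]
  | cons y δ ih =>
    intro ns hnd hf
    have hy : y ∉ ns := hf y (by simp)
    have : PySem.Set.update ns (y :: δ) = PySem.Set.update (ns ++ [y]) δ := by
      simp [PySem.Set.update, PySem.Set.add, PySem.Set.contains, hy]
    rw [this, ih (ns ++ [y]) hnd.of_cons]
    · simp
    · intro z hz
      simp only [List.mem_append, List.mem_singleton]
      rintro (h1 | h2)
      · exact hf z (by simp [hz]) h1
      · exact (List.nodup_cons.mp hnd).1 (h2 ▸ hz)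

-- every child list is drawn from the flattened value pool of the map
theorem pvChilds_mem {cmap : List (String × List String)} {x c : String}
    (h : c ∈ pvChilds cmap x) : c ∈ cmap.flatMap Prod.snd := by
  unfold pvChilds PySem.Dict.getD PySem.Dict.get? at h
  cases hf : cmap.find? (fun p => p.1 == x) with
  | none => simp [hf] at h
  | some p =>
    have hp : p ∈ cmap := List.mem_of_find?_eq_some hf
    simp [hf] at h
    exact List.mem_flatMap.mpr ⟨p, hp, h⟩

-- shape of A's fold: starting from names ⊆ visited it appends the same fresh block to both
theorem pvFoldA_shape_aux (cmap : List (String × List String)) (f : Nat)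
    (hP : ∀ (r : String) (v : List String),
      ∃ δ, pvGoA cmap f r v = (δ, v ++ δ) ∧ (∀ y ∈ δ, y ∉ v) ∧ δ.Nodup) :
    ∀ (cs v ns : List String), ns.Nodup → (∀ y ∈ ns, y ∈ v) →
      ∃ δ, cs.foldl (pvStepA cmap f) (ns, v) = (ns ++ δ, v ++ δ) ∧ (∀ y ∈ δ, y ∉ v) ∧ δ.Nodup := by
  intro cs
  induction cs with
  | nil => intro v ns _ _; exact ⟨[], by simp⟩
  | cons c cs ih =>
    intro v ns hnd hsub
    obtain ⟨δ₁, hq, hfr₁, hnd₁⟩ := hP c v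
    have hstep : pvStepA cmap f (ns, v) c = (ns ++ δ₁, v ++ δ₁) := by
      simp only [pvStepA, hq]
      rw [pvUpdate_fresh δ₁ ns hnd₁ (fun y hy hns => hfr₁ y hy (hsub y hns))]
    obtain ⟨δ₂, hfold, hfr₂, hnd₂⟩ := ih (v ++ δ₁) (ns ++ δ₁)
      (by
        rw [List.nodup_append]
        exact ⟨hnd, hnd₁, fun a ha b hb he => hfr₁ b hb (he ▸ hsub a ha)⟩)
      (by intro y hy; rcases List.mem_append.mp hy with h | h
          · exact List.mem_append.mpr (Or.inl (hsub y h))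
          · exact List.mem_append.mpr (Or.inr h))
    refine ⟨δ₁ ++ δ₂, ?_, ?_, ?_⟩
    · simp only [List.foldl_cons, hstep, hfold, List.append_assoc]
    · intro y hy
      rcases List.mem_append.mp hy with h | h
      · exact hfr₁ y h
      · exact fun hv => hfr₂ y h (List.mem_append.mpr (Or.inl hv))
    · rw [List.nodup_append]
      exact ⟨hnd₁, hnd₂, fun a ha b hb he => hfr₂ b hb (List.mem_append.mpr (Or.inr (he ▸ ha)))⟩

-- shape of A's recursion: it returns exactly the freshly visited nodes, appended to visited
theorem pvGoA_shape (cmap : List (String × List String)) :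
    ∀ (f : Nat) (r : String) (v : List String),
      ∃ δ, pvGoA cmap f r v = (δ, v ++ δ) ∧ (∀ y ∈ δ, y ∉ v) ∧ δ.Nodup := by
  intro f
  induction f with
  | zero => intro r v; exact ⟨[], by simp [pvGoA]⟩
  | succ f ih =>
    intro r v
    by_cases hr : PySem.Set.contains v r
    · exact ⟨[], by rw [pvGoA_succ, if_pos hr]; simp⟩
    · have hrv : r ∉ v := by simpa [PySem.Set.contains] using hr
      have hadd : PySem.Set.add v r = v ++ [r] := pvSet_add_of_not_mem hrv
      have hofl : PySem.Set.ofList [r] = [r] := by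
        simp [PySem.Set.ofList, PySem.Set.add, PySem.Set.empty, PySem.Set.contains]
      obtain ⟨δ, hfold, hfr, hnd⟩ := pvFoldA_shape_aux cmap f ih (pvChilds cmap r) (v ++ [r]) [r]
        (by simp) (by simp)
      refine ⟨r :: δ, ?_, ?_, ?_⟩
      · rw [pvGoA_succ, if_neg hr, hofl, hadd, hfold]
        simp
      · intro y hy
        rcases List.mem_cons.mp hy with h | h
        · exact h ▸ hrv
        · exact fun hv => hfr y h (by simp [hv])
      · exact List.nodup_cons.mpr ⟨fun hrδ => hfr r hrδ (by simp), hnd⟩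

-- the visited component of A's fold does not depend on the names accumulator
theorem pvFoldA_snd_indep (cmap : List (String × List String)) (f : Nat) :
    ∀ (cs : List String) (v ns ns' : List String),
      (cs.foldl (pvStepA cmap f) (ns, v)).2 = (cs.foldl (pvStepA cmap f) (ns', v)).2 := by
  intro cs
  induction cs with
  | nil => intro v ns ns'; rfl
  | cons c cs ih =>
    intro v ns ns'
    simp only [List.foldl_cons, pvStepA]
    exact ih _ _ _

-- per-call measure for the fuel lemma
def pvMeas (cmap : List (String × List String)) (r : String) (v : List String) : Nat :=
  ((insert r (cmap.flatMap Prod.snd).toFinset).filter (fun x => x ∉ v)).card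

-- A's fuel is irrelevant beyond the number of reachable unvisited nodes
theorem pvGoA_fuel (cmap : List (String × List String)) :
    ∀ (n f g : Nat) (r : String) (v : List String),
      pvMeas cmap r v ≤ n → n < f → n < g → pvGoA cmap f r v = pvGoA cmap g r v := by
  intro n
  induction n with
  | zero =>
    intro f g r v hm hf hg
    obtain ⟨f', rfl⟩ : ∃ f', f = f' + 1 := ⟨f - 1, by omega⟩
    obtain ⟨g', rfl⟩ : ∃ g', g = g' + 1 := ⟨g - 1, by omega⟩
    have hrv : r ∈ v := by
      by_contra hrv
      have : r ∈ (insert r (cmap.flatMap Prod.snd).toFinset).filter (fun x => x ∉ v) :=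
        Finset.mem_filter.mpr ⟨Finset.mem_insert_self _ _, hrv⟩
      have hpos := Finset.card_pos.mpr ⟨r, this⟩
      unfold pvMeas at hm
      omega
    have hr : PySem.Set.contains v r = true := by simpa [PySem.Set.contains] using hrv
    rw [pvGoA_succ, pvGoA_succ, if_pos hr, if_pos hr]
  | succ n ihn =>
    intro f g r v hm hf hg
    obtain ⟨f', rfl⟩ : ∃ f', f = f' + 1 := ⟨f - 1, by omega⟩
    obtain ⟨g', rfl⟩ : ∃ g', g = g' + 1 := ⟨g - 1, by omega⟩
    by_cases hr : PySem.Set.contains v r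
    · rw [pvGoA_succ, pvGoA_succ, if_pos hr, if_pos hr]
    · have hrv : r ∉ v := by simpa [PySem.Set.contains] using hr
      have key : ∀ c, c ∈ cmap.flatMap Prod.snd → ∀ v'' : List String, (∀ y ∈ v, y ∈ v'') → r ∈ v'' →
          pvMeas cmap c v'' ≤ n := by
        intro c hc v'' hsub hrv''
        have hsubset : (insert c (cmap.flatMap Prod.snd).toFinset).filter (fun x => x ∉ v'') ⊆
            ((insert r (cmap.flatMap Prod.snd).toFinset).filter (fun x => x ∉ v)).erase r := by
          intro y hy
          obtain ⟨hy1, hy2⟩ := Finset.mem_filter.mp hy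
          have hyF : y ∈ (cmap.flatMap Prod.snd).toFinset := by
            rcases Finset.mem_insert.mp hy1 with h | h
            · exact h ▸ List.mem_toFinset.mpr hc
            · exact h
          refine Finset.mem_erase.mpr ⟨fun he => hy2 (he ▸ hrv''), Finset.mem_filter.mpr
            ⟨Finset.mem_insert_of_mem hyF, fun hv => hy2 (hsub y hv)⟩⟩
        have hrmem : r ∈ (insert r (cmap.flatMap Prod.snd).toFinset).filter (fun x => x ∉ v) :=
          Finset.mem_filter.mpr ⟨Finset.mem_insert_self _ _, hrv⟩
        have := Finset.card_le_card hsubset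
        rw [Finset.card_erase_of_mem hrmem] at this
        unfold pvMeas at hm ⊢
        omega
      have fold : ∀ cs : List String, (∀ c ∈ cs, c ∈ cmap.flatMap Prod.snd) →
          ∀ p : List String × List String, (∀ y ∈ v, y ∈ p.2) → r ∈ p.2 →
          cs.foldl (pvStepA cmap f') p = cs.foldl (pvStepA cmap g') p := by
        intro cs
        induction cs with
        | nil => intro _ _ _ _; rfl
        | cons c cs ihc =>
          intro hcs p hp1 hp2
          have hqeq : pvGoA cmap f' c p.2 = pvGoA cmap g' c p.2 :=
            ihn f' g' c p.2 (key c (hcs c (by simp)) p.2 hp1 hp2) (by omega) (by omega)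
          have hstep : pvStepA cmap f' p c = pvStepA cmap g' p c := by
            simp only [pvStepA, hqeq]
          obtain ⟨δ, hsh, _, _⟩ := pvGoA_shape cmap g' c p.2
          simp only [List.foldl_cons, hstep]
          apply ihc (fun c' hc' => hcs c' (by simp [hc']))
          · intro y hy
            simp only [pvStepA, hsh]
            exact List.mem_append.mpr (Or.inl (hp1 y hy))
          · simp only [pvStepA, hsh]
            exact List.mem_append.mpr (Or.inl hp2)
      rw [pvGoA_succ, pvGoA_succ, if_neg hr, if_neg hr]
      apply fold (pvChilds cmap r) (fun c hc => pvChilds_mem hc)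
      · intro y hy
        rw [pvSet_add_of_not_mem hrv]
        simp [hy]
      · rw [pvSet_add_of_not_mem hrv]
        simp

theorem pvFoldA_fuel (cmap : List (String × List String)) :
    ∀ (cs : List String) (f g : Nat) (p : List String × List String),
      (∀ c ∈ cs, c ∈ cmap.flatMap Prod.snd) →
      (cmap.flatMap Prod.snd).toFinset.card < f → (cmap.flatMap Prod.snd).toFinset.card < g →
      cs.foldl (pvStepA cmap f) p = cs.foldl (pvStepA cmap g) p := by
  intro cs
  induction cs with
  | nil => intro _ _ _ _ _ _; rfl
  | cons c cs ih =>
    intro f g p hcs hf hg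
    have hmeas : pvMeas cmap c p.2 ≤ (cmap.flatMap Prod.snd).toFinset.card := by
      have hcF : c ∈ (cmap.flatMap Prod.snd).toFinset := List.mem_toFinset.mpr (hcs c (by simp))
      calc ((insert c (cmap.flatMap Prod.snd).toFinset).filter (fun x => x ∉ p.2)).card
          ≤ (insert c (cmap.flatMap Prod.snd).toFinset).card := Finset.card_filter_le _ _
        _ = (cmap.flatMap Prod.snd).toFinset.card := by rw [Finset.insert_eq_self.mpr hcF]
    have hq : pvGoA cmap f c p.2 = pvGoA cmap g c p.2 :=
      pvGoA_fuel cmap _ f g c p.2 hmeas hf hg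
    simp only [List.foldl_cons, pvStepA, hq]
    exact ih f g _ (fun c' hc' => hcs c' (by simp [hc'])) hf hg

-- the simulation: B's stack loop equals A's recursion folded over the stack
theorem pvSim (cmap : List (String × List String)) (fA : Nat)
    (hfA : (cmap.flatMap Prod.snd).toFinset.card + 2 < fA) :
    ∀ (s v ns : List String), ns.Nodup → (∀ y ∈ ns, y ∈ v) →
      pvGoB cmap s v ns = s.foldl (pvStepA cmap fA) (ns, v) := by
  obtain ⟨fA', rfl⟩ : ∃ k, fA = k + 1 := ⟨fA - 1, by omega⟩
  intro s v ns
  induction s, v, ns using pvGoB.induct cmap with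
  | case1 v ns => intro _ _; simp [pvGoB]
  | case2 x s v ns hx ih =>
    intro hnd hsub
    have hq : pvGoA cmap (fA' + 1) x v = ([], v) := by rw [pvGoA_succ, if_pos hx]
    have hstep : pvStepA cmap (fA' + 1) (ns, v) x = (ns, v) := by
      simp only [pvStepA, hq]
      rfl
    rw [pvGoB, dif_pos hx, List.foldl_cons, hstep]
    exact ih hnd hsub
  | case3 x s v ns hx ih =>
    intro hnd hsub
    have hxv : x ∉ v := by simpa [PySem.Set.contains] using hx
    have hxns : x ∉ ns := fun h => hxv (hsub x h)
    have haddv : PySem.Set.add v x = v ++ [x] := pvSet_add_of_not_mem hxv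
    have haddns : PySem.Set.add ns x = ns ++ [x] := pvSet_add_of_not_mem hxns
    have hnd' : (ns ++ [x]).Nodup := by
      rw [List.nodup_append]
      refine ⟨hnd, by simp, ?_⟩
      intro a ha b hb he
      simp only [List.mem_singleton] at hb
      subst hb
      exact hxns (he ▸ ha)
    have hsub' : ∀ y ∈ ns ++ [x], y ∈ v ++ [x] := by
      intro y hy
      rcases List.mem_append.mp hy with h | h
      · exact List.mem_append.mpr (Or.inl (hsub y h))
      · exact List.mem_append.mpr (Or.inr h)
    rw [haddv, haddns] at ih
    rw [pvGoB, dif_neg hx, haddv, haddns, ih hnd' hsub', List.foldl_append, List.foldl_cons]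
    congr 1
    have hchmem : ∀ c ∈ pvChilds cmap x, c ∈ cmap.flatMap Prod.snd := fun c hc => pvChilds_mem hc
    obtain ⟨δ, hfold, hfr, hndδ⟩ := pvFoldA_shape_aux cmap (fA' + 1) (pvGoA_shape cmap (fA' + 1))
      (pvChilds cmap x) (v ++ [x]) [x] (by simp) (by simp)
    have hofl : PySem.Set.ofList [x] = [x] := by
      simp [PySem.Set.ofList, PySem.Set.add, PySem.Set.empty, PySem.Set.contains]
    have hqx : pvGoA cmap (fA' + 1) x v = ([x] ++ δ, (v ++ [x]) ++ δ) := by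
      rw [pvGoA_succ, if_neg hx, hofl, haddv,
        pvFoldA_fuel cmap (pvChilds cmap x) fA' (fA' + 1) _ hchmem (by omega) (by omega), hfold]
    obtain ⟨δ', hfold', hfr', hndδ'⟩ := pvFoldA_shape_aux cmap (fA' + 1) (pvGoA_shape cmap (fA' + 1))
      (pvChilds cmap x) (v ++ [x]) (ns ++ [x]) hnd' hsub'
    have hδeq : δ' = δ := by
      have h2 := pvFoldA_snd_indep cmap (fA' + 1) (pvChilds cmap x) (v ++ [x]) (ns ++ [x]) [x]
      rw [hfold, hfold'] at h2
      simpa using h2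
    rw [hfold', hδeq]
    have hupd : PySem.Set.update ns ([x] ++ δ) = ns ++ [x] ++ δ := by
      rw [pvUpdate_fresh ([x] ++ δ) ns, List.append_assoc]
      · rw [List.nodup_append]
        exact ⟨by simp, hndδ, by
          simp only [List.mem_singleton]
          intro a ha b hb he
          exact hfr b hb (List.mem_append.mpr (Or.inr (by simp [← he, ha])))⟩
      · intro y hy
        rcases List.mem_append.mp hy with h | h
        · simp only [List.mem_singleton] at h
          exact h ▸ hxns
        · exact fun hns => hfr y h (List.mem_append.mpr (Or.inl (hsub y hns)))
    simp only [pvStepA, hqx, hupd]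

-- ===== VERDICT (by name: the statement is the Claim_ definition above) =====
theorem get_subtree_names_spec : Claim_equal_get_subtree_names := by
  intro root cmap visited _
  unfold Spec_get_subtree_names get_subtree_names get_subtree_names_alt
  set v0 := visited.getD [] with hv0
  have hfA : (cmap.flatMap Prod.snd).toFinset.card + 2 < (cmap.flatMap Prod.snd).length + 3 := by
    have := List.toFinset_card_le (cmap.flatMap Prod.snd)
    omega
  have hsim := pvSim cmap ((cmap.flatMap Prod.snd).length + 3) hfA [root] v0 [] (by simp) (by simp)
  obtain ⟨δ, hsh, _, hnd⟩ := pvGoA_shape cmap ((cmap.flatMap Prod.snd).length + 3) root v0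
  have hemp : PySem.Set.empty = ([] : List String) := rfl
  rw [hemp, hsim, List.foldl_cons, List.foldl_nil]
  simp only [pvStepA, hsh]
  rw [pvUpdate_fresh δ [] hnd (by simp)]
  simp
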